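-- pv_equiv track=rewrite | github.com/Aryudesu/ABC | ABC/300_399/397/E.py | calc
-- ===== SOURCE A (Python) =====
-- def calc(N, K, graph, memo: set, now_node: int):
--     count = 0
--     this_num = 1
--     for node in graph[now_node]:
--         if node in memo:
--             continue
--         memo.add(node)
--         res = calc(N, K, graph, memo, node)
--         memo.discard(node)
--         if res == -1:
--             return -1
--         elif res > 0:
--             count += 1
--             if count > 2:
--                 return -1
--         this_num += res
--     if this_num == K:
--         return 0
--     if count <= 1:
--         return this_num
--     return -1
-- ===== SOURCE B (Python) =====
-- def calc(N, K, graph, memo: set, now_node: int):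
--     # Iterative DFS with an explicit stack of frames; never mutates the caller's memo.
--     visited = set(memo)
--     stack = [[now_node, list(graph[now_node]), 0, 0, 1]]  # node, adj, i, count, this_num
--     while True:
--         fr = stack[-1]
--         node, adj, i = fr[0], fr[1], fr[2]
--         if i < len(adj):
--             c = adj[i]
--             fr[2] = i + 1
--             if c in visited:
--                 continue
--             visited.add(c)
--             stack.append([c, list(graph[c]), 0, 0, 1])
--             continue
--         # frame finished: finalize and feed the result to the parent frame
--         stack.pop()
--         count, this_num = fr[3], fr[4]
--         if this_num == K:
--             res = 0
--         elif count <= 1: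
--             res = this_num
--         else:
--             res = -1
--         if not stack:
--             return res
--         visited.discard(node)
--         if res == -1:
--             return -1
--         parent = stack[-1]
--         if res > 0:
--             parent[3] += 1
--             if parent[3] > 2:
--                 return -1
--         parent[4] += res
-- ===== Notes on version B (the rewrite author's own statement) =====
-- stated objective: alternative
-- what changed: A's recursive DFS (one call per node, in-place add/discard on the shared memo set) is re-decomposed into an iterative traversal over an explicit stack of (node, neighbours, count, this_num) frames that folds each popped frame's result into its parent frame, never mutating the caller's memo.
-- outside the precondition, e.g. on calc(2, 5, {0: [1, 1, 1, 9], 1: []}, set(), 0): A returns -1, B returns -1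
import Mathlib
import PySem

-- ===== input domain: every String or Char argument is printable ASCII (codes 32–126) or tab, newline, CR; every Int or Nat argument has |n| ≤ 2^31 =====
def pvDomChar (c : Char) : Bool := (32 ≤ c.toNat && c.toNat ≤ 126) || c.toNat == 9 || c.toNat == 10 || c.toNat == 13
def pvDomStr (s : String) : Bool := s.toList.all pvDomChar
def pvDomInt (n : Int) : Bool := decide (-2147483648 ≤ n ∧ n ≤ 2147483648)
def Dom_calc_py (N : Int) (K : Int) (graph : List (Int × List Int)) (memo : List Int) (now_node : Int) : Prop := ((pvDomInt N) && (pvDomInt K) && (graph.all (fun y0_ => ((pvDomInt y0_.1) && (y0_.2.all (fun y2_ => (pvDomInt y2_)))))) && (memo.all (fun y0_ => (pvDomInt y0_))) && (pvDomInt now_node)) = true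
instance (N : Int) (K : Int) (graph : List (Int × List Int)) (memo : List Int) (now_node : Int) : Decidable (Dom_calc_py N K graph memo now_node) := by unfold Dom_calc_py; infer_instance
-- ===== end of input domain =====

-- B replaces A's recursive DFS by an iterative traversal over an explicit stack of
-- (node, remaining-neighbours, count, this_num) frames (objective: alternative, not faster).
-- A mutates the shared memo set in place (restored before every normal return); B never
-- mutates memo; the equivalence proved here is about the return value only.
-- Both ports are fueled by the input-derived depth bound pvFuel (adjacency size + 1); the
-- Python recursion depth never exceeds it because the visited set grows with adjacency values.

-- fuel bound: one more than the total number of adjacency entries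
def pvFuel (graph : List (Int × List Int)) : Nat := (graph.flatMap (fun p => p.2)).length + 1

-- ===== PORT A =====
-- literal port of A: loop over graph[now_node] with (count, this_num) accumulators; the three
-- early 'return -1' exits are carried as the 'none' loop state; fueled structurally.
def calcA (K : Int) (graph : List (Int × List Int)) : Nat → List Int → Int → Int
  | 0, _memo, _now_node => 0
  | Nat.succ f, memo, now_node =>
    let st := (((PySem.Dict.mk graph).get? now_node).getD []).foldl
      (fun st node =>
        match st with
        | none => none
        | some (count, this_num) =>
          if PySem.Set.contains memo node then some (count, this_num)
          else
            let res := calcA K graph f (PySem.Set.add memo node) node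
            if res = -1 then none
            else if res > 0 then
              if count + 1 > 2 then none
              else some (count + 1, this_num + res)
            else some (count, this_num + res))
      (some ((0 : Int), (1 : Int)))
    match st with
    | none => -1
    | some (count, this_num) =>
      if this_num = K then 0 else if count ≤ 1 then this_num else -1

def calc_py (N : Int) (K : Int) (graph : List (Int × List Int)) (memo : List Int) (now_node : Int) : Int :=
  calcA K graph (pvFuel graph) memo now_node

-- ===== PORT B =====
-- graph[c] of Source B (total via getD; Pre_ excludes the KeyError inputs)
def adjOf (graph : List (Int × List Int)) (c : Int) : List Int :=
  ((PySem.Dict.mk graph).get? c).getD []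

-- the adjacency list a lookup returns is one of the graph's value lists
theorem adjOf_len_le (graph : List (Int × List Int)) (c : Int) :
    (adjOf graph c).length ≤ (graph.flatMap (fun p => p.2)).length := by
  induction graph with
  | nil => simp [adjOf, PySem.Dict.mk, PySem.Dict.get?]
  | cons p rest ih =>
    by_cases h : (p.1 == c) = true
    · have : adjOf (p :: rest) c = p.2 := by
        simp [adjOf, PySem.Dict.mk, PySem.Dict.get?, List.find?, h]
      rw [this]; simp [List.flatMap_cons]
    · have : adjOf (p :: rest) c = adjOf rest c := by
        simp [adjOf, PySem.Dict.mk, PySem.Dict.get?, List.find?, h]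
      rw [this]; simp only [List.flatMap_cons, List.length_append]
      omega

-- a machine frame of Source B: node, remaining neighbours, count, this_num, plus the fuel guard d
-- (d is the depth fuel of the corresponding recursive call; a frame with d = 0 yields 0,
--  exactly as calcA does at fuel 0 — the guard only makes the computation total)
-- literal port of Source B's while-loop: one recursive call per loop iteration
def runB (K : Int) (graph : List (Int × List Int)) (v : List Int)
    (stack : List (Int × List Int × Int × Int × Nat)) : Int :=
  match stack with
  | [] => 0   -- unreachable from calc_py_alt's initial one-frame stack
  | (node, adj, count, this_num, d) :: rest =>
    match d, adj with
    | Nat.succ d', c :: adj' =>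
      if PySem.Set.contains v c then
        runB K graph v ((node, adj', count, this_num, Nat.succ d') :: rest)
      else
        runB K graph (PySem.Set.add v c)
          ((c, adjOf graph c, 0, 1, d') :: (node, adj', count, this_num, Nat.succ d') :: rest)
    | Nat.succ _, [] =>
      -- frame finished: finalize and feed the result to the parent frame
      let res := if this_num = K then 0 else if count ≤ 1 then this_num else (-1 : Int)
      match rest with
      | [] => res
      | (pn, padj, pc, pt, pd) :: rest' =>
        if res = -1 then -1
        else if res > 0 then
          if pc + 1 > 2 then -1
          else runB K graph (PySem.Set.discard v node) ((pn, padj, pc + 1, pt + res, pd) :: rest')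
        else runB K graph (PySem.Set.discard v node) ((pn, padj, pc, pt + res, pd) :: rest')
    | 0, _ =>
      -- fuel guard (no Python counterpart): this frame yields 0, as calcA does at fuel 0
      let res : Int := 0
      match rest with
      | [] => res
      | (pn, padj, pc, pt, pd) :: rest' =>
        if res = -1 then -1
        else if res > 0 then
          if pc + 1 > 2 then -1
          else runB K graph (PySem.Set.discard v node) ((pn, padj, pc + 1, pt + res, pd) :: rest')
        else runB K graph (PySem.Set.discard v node) ((pn, padj, pc, pt + res, pd) :: rest')
termination_by
  (stack.map (fun f =>
    f.2.1.length * ((graph.flatMap (fun p => p.2)).length + 2) ^ f.2.2.2.2 + 1)).sum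
decreasing_by
  · simp only [List.map_cons, List.sum_cons, List.length_cons, Nat.succ_mul, Nat.succ_eq_add_one]
    have h2 : 1 ≤ ((graph.flatMap (fun p => p.2)).length + 2) ^ (d' + 1) :=
      Nat.one_le_pow _ _ (by omega)
    omega
  · simp only [List.map_cons, List.sum_cons, List.length_cons, Nat.succ_mul, Nat.succ_eq_add_one]
    set L := (graph.flatMap (fun p => p.2)).length with hL
    have h1 : (adjOf graph c).length ≤ L := adjOf_len_le graph c
    have h2 : 1 ≤ (L + 2) ^ d' := Nat.one_le_pow _ _ (by omega)
    have key : (adjOf graph c).length * (L + 2) ^ d' + 1 < (L + 2) ^ (d' + 1) := by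
      have : (adjOf graph c).length * (L + 2) ^ d' + 1 ≤ L * (L + 2) ^ d' + (L + 2) ^ d' :=
        Nat.add_le_add (Nat.mul_le_mul_right _ h1) h2
      have hlt : L * (L + 2) ^ d' + (L + 2) ^ d' < (L + 2) * (L + 2) ^ d' := by
        have := Nat.one_le_pow d' (L + 2) (by omega)
        nlinarith
      calc (adjOf graph c).length * (L + 2) ^ d' + 1
          ≤ L * (L + 2) ^ d' + (L + 2) ^ d' := this
        _ < (L + 2) * (L + 2) ^ d' := hlt
        _ = (L + 2) ^ (d' + 1) := by rw [pow_succ]; ring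
    omega
  · simp only [List.map_cons, List.sum_cons]; omega
  · simp only [List.map_cons, List.sum_cons]; omega
  · simp only [List.map_cons, List.sum_cons]
    have h2 : 1 ≤ ((graph.flatMap (fun p => p.2)).length + 2) ^ (0 : Nat) :=
      Nat.one_le_pow _ _ (by omega)
    omega
  · simp only [List.map_cons, List.sum_cons]
    have h2 : 1 ≤ ((graph.flatMap (fun p => p.2)).length + 2) ^ (0 : Nat) :=
      Nat.one_le_pow _ _ (by omega)
    omega

def calc_py_alt (N : Int) (K : Int) (graph : List (Int × List Int)) (memo : List Int) (now_node : Int) : Int :=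
  -- Source B's 'visited = set(memo)' copies the set; values are immutable here, so the copy is memo itself
  runB K graph memo [(now_node, adjOf graph now_node, 0, 1, pvFuel graph)]

-- ===== PRECONDITION & SPEC =====
-- Pre_ excludes the inputs on which A raises KeyError: some node reachable from now_node
-- through vertices not in memo is not a key of graph; since this reachable set slightly
-- over-approximates the nodes A visits (A may return -1 early and skip a dangling branch),
-- a few inputs on which A still returns are excluded too (see cites).
def pvReachStep (graph : List (Int × List Int)) (memo : List Int) (S : List Int) : List Int :=
  S.foldl (fun acc u =>
    (((PySem.Dict.mk graph).get? u).getD []).foldl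
      (fun acc c => if PySem.Set.contains memo c then acc else PySem.Set.add acc c) acc) S

def pvReach (graph : List (Int × List Int)) (memo : List Int) (now_node : Int) : List Int :=
  (List.range ((graph.flatMap (fun p => p.2)).length + 1)).foldl
    (fun S _ => pvReachStep graph memo S) [now_node]

def Pre_calc_py (N : Int) (K : Int) (graph : List (Int × List Int)) (memo : List Int) (now_node : Int) : Prop :=
  ∀ v ∈ pvReach graph memo now_node, v ∈ graph.map Prod.fst
instance (N : Int) (K : Int) (graph : List (Int × List Int)) (memo : List Int) (now_node : Int) : Decidable (Pre_calc_py N K graph memo now_node) := by unfold Pre_calc_py; infer_instance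

def pvWitness_calc_py : Int × Int × (List (Int × List Int)) × List Int × Int :=
  (3, 2, [(0, [1, 2]), (1, []), (2, [0])], [], 0)

def Spec_calc_py (N : Int) (K : Int) (graph : List (Int × List Int)) (memo : List Int) (now_node : Int) (out : Int) : Prop := out = calc_py_alt N K graph memo now_node
instance (N : Int) (K : Int) (graph : List (Int × List Int)) (memo : List Int) (now_node : Int) (out : Int) : Decidable (Spec_calc_py N K graph memo now_node out) := by unfold Spec_calc_py; infer_instance

-- ===== CLAIM (what is proved, stated in full; the proofs are below) =====
def Claim_equal_calc_py : Prop := ∀ (N : Int) (K : Int) (graph : List (Int × List Int)) (memo : List Int) (now_node : Int), Dom_calc_py N K graph memo now_node → Pre_calc_py N K graph memo now_node → Spec_calc_py N K graph memo now_node (calc_py N K graph memo now_node)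

-- ===== LEMMAS AND PROOFS =====

-- generic step function of A's loop, with the recursive call abstracted as c
def stepA (memo : List Int) (c : Int → Int) (st : Option (Int × Int)) (node : Int) : Option (Int × Int) :=
  match st with
  | none => none
  | some (count, this_num) =>
    if PySem.Set.contains memo node then some (count, this_num)
    else
      let res := c node
      if res = -1 then none
      else if res > 0 then
        if count + 1 > 2 then none
        else some (count + 1, this_num + res)
      else some (count, this_num + res)

theorem foldl_stepA_none (memo : List Int) (c : Int → Int) (adj : List Int) :
    adj.foldl (stepA memo c) none = none := by
  induction adj with
  | nil => rfl
  | cons node rest ih => simpa [stepA] using ih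

-- the value of one frame: A's loop over the remaining neighbours, children via calcA
def specFrame (K : Int) (graph : List (Int × List Int)) (v : List Int)
    (fr : Int × List Int × Int × Int × Nat) : Int :=
  match fr with
  | (_, _, _, _, 0) => 0
  | (_, adj, count, this_num, Nat.succ d') =>
    match adj.foldl (stepA v (fun c => calcA K graph d' (PySem.Set.add v c) c))
        (some (count, this_num)) with
    | none => -1
    | some (ct, tn) => if tn = K then 0 else if ct ≤ 1 then tn else -1

-- the value of a whole machine stack: the head frame's value fed up through the parents
def specStack (K : Int) (graph : List (Int × List Int)) (v : List Int) :
    List (Int × List Int × Int × Int × Nat) → Int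
  | [] => 0
  | fr :: rest =>
    let r := specFrame K graph v fr
    match rest with
    | [] => r
    | (pn, padj, pc, pt, pd) :: rest' =>
      if r = -1 then -1
      else if r > 0 then
        if pc + 1 > 2 then -1
        else specStack K graph (PySem.Set.discard v fr.1) ((pn, padj, pc + 1, pt + r, pd) :: rest')
      else specStack K graph (PySem.Set.discard v fr.1) ((pn, padj, pc, pt + r, pd) :: rest')
termination_by stack => stack.length

theorem specFrame_calcA (K : Int) (graph : List (Int × List Int)) (v : List Int)
    (c : Int) (d : Nat) :
    specFrame K graph v (c, adjOf graph c, 0, 1, d) = calcA K graph d v c := by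
  cases d with
  | zero => rfl
  | succ d' => rfl

theorem specStack_congr (K : Int) (graph : List (Int × List Int)) (v : List Int)
    (n : Int) (adj adj' : List Int) (ct ct' tn tn' : Int) (d d' : Nat)
    (rest : List (Int × List Int × Int × Int × Nat))
    (h : specFrame K graph v (n, adj, ct, tn, d) = specFrame K graph v (n, adj', ct', tn', d')) :
    specStack K graph v ((n, adj, ct, tn, d) :: rest) =
      specStack K graph v ((n, adj', ct', tn', d') :: rest) := by
  cases rest with
  | nil => simp [specStack, h]
  | cons p rest' =>
    obtain ⟨pn, padj, pc, pt, pd⟩ := p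
    simp only [specStack, h]

theorem discard_add_self (v : List Int) (c : Int) (h : PySem.Set.contains v c = false) :
    PySem.Set.discard (PySem.Set.add v c) c = v := by
  have hc : c ∉ v := by
    intro hm
    rw [(PySem.Set.contains_iff v c).mpr hm] at h
    cases h
  rw [PySem.Set.add_of_not_mem hc]
  simp only [PySem.Set.discard, List.filter_append]
  have h1 : v.filter (fun y => !y == c) = v := by
    apply List.filter_eq_self.mpr
    intro y hy
    simp only [Bool.not_eq_eq_eq_not, Bool.not_true, beq_eq_false_iff_ne, ne_eq]
    rintro rfl; exact hc hy
  simp [h1]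


theorem specStack_nil (K : Int) (graph : List (Int × List Int)) (v : List Int) :
    specStack K graph v [] = 0 := by
  simp [specStack]

theorem specStack_single (K : Int) (graph : List (Int × List Int)) (v : List Int)
    (fr : Int × List Int × Int × Int × Nat) :
    specStack K graph v [fr] = specFrame K graph v fr := by
  simp [specStack]

theorem specStack_cons_cons (K : Int) (graph : List (Int × List Int)) (v : List Int)
    (fr : Int × List Int × Int × Int × Nat) (pn : Int) (padj : List Int) (pc pt : Int) (pd : Nat)
    (rest' : List (Int × List Int × Int × Int × Nat)) :
    specStack K graph v (fr :: (pn, padj, pc, pt, pd) :: rest') =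
      (if specFrame K graph v fr = -1 then -1
       else if specFrame K graph v fr > 0 then
         if pc + 1 > 2 then -1
         else specStack K graph (PySem.Set.discard v fr.1)
           ((pn, padj, pc + 1, pt + specFrame K graph v fr, pd) :: rest')
       else specStack K graph (PySem.Set.discard v fr.1)
         ((pn, padj, pc, pt + specFrame K graph v fr, pd) :: rest')) := by
  rw [specStack]

theorem specFrame_zero (K : Int) (graph : List (Int × List Int)) (v : List Int)
    (n : Int) (adj : List Int) (ct tn : Int) :
    specFrame K graph v (n, adj, ct, tn, 0) = 0 := rfl

theorem specFrame_final (K : Int) (graph : List (Int × List Int)) (v : List Int)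
    (n : Int) (ct tn : Int) (d : Nat) :
    specFrame K graph v (n, [], ct, tn, Nat.succ d) =
      (if tn = K then 0 else if ct ≤ 1 then tn else -1) := rfl

theorem specFrame_skip (K : Int) (graph : List (Int × List Int)) (v : List Int)
    (n : Int) (c : Int) (adj : List Int) (ct tn : Int) (d : Nat)
    (h : PySem.Set.contains v c = true) :
    specFrame K graph v (n, c :: adj, ct, tn, Nat.succ d) =
      specFrame K graph v (n, adj, ct, tn, Nat.succ d) := by
  simp only [specFrame, List.foldl_cons, stepA, h, if_true]

theorem specFrame_child (K : Int) (graph : List (Int × List Int)) (v : List Int)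
    (n : Int) (c : Int) (adj : List Int) (ct tn : Int) (d : Nat)
    (h : PySem.Set.contains v c = false) :
    specFrame K graph v (n, c :: adj, ct, tn, Nat.succ d) =
      (if calcA K graph d (PySem.Set.add v c) c = -1 then -1
       else if calcA K graph d (PySem.Set.add v c) c > 0 then
         if ct + 1 > 2 then -1
         else specFrame K graph v (n, adj, ct + 1, tn + calcA K graph d (PySem.Set.add v c) c, Nat.succ d)
       else specFrame K graph v (n, adj, ct, tn + calcA K graph d (PySem.Set.add v c) c, Nat.succ d)) := by
  simp only [specFrame, List.foldl_cons, stepA, h, if_false, Bool.false_eq_true]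
  split_ifs with h1 h2 h3 <;> simp [foldl_stepA_none]

theorem specStack_head_neg1 (K : Int) (graph : List (Int × List Int)) (v : List Int)
    (fr : Int × List Int × Int × Int × Nat)
    (rest : List (Int × List Int × Int × Int × Nat))
    (h : specFrame K graph v fr = -1) :
    specStack K graph v (fr :: rest) = -1 := by
  cases rest with
  | nil => rw [specStack_single, h]
  | cons p rest' =>
    obtain ⟨pn, padj, pc, pt, pd⟩ := p
    rw [specStack_cons_cons, h]
    simp

-- the machine computes the stack's spec value
theorem runB_eq_specStack (K : Int) (graph : List (Int × List Int)) :
    ∀ (v : List Int) (stack : List (Int × List Int × Int × Int × Nat)),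
    runB K graph v stack = specStack K graph v stack := by
  intro v stack
  fun_induction runB K graph v stack
  case case1 => rw [specStack_nil]
  case case2 =>
    rename_i v pn pc pt rest' d' c adj' h ih
    rw [ih]
    exact specStack_congr K graph v pn adj' (c :: adj') pc pc pt pt (Nat.succ d') (Nat.succ d')
      rest' (specFrame_skip K graph v pn c adj' pc pt d' h).symm
  case case3 =>
    rename_i v pn pc pt rest' d' c adj' h ih
    have hc : PySem.Set.contains v c = false := by
      cases hcc : PySem.Set.contains v c
      · rfl
      · exact absurd hcc h
    rw [ih, specStack_cons_cons, specFrame_calcA, discard_add_self v c hc]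
    have hchild := specFrame_child K graph v pn c adj' pc pt d' hc
    by_cases h1 : calcA K graph d' (PySem.Set.add v c) c = -1
    · rw [if_pos h1, specStack_head_neg1 K graph v _ rest' (by rw [hchild]; simp [h1])]
    · rw [if_neg h1]
      by_cases h2 : calcA K graph d' (PySem.Set.add v c) c > 0
      · rw [if_pos h2]
        by_cases h3 : pc + 1 > 2
        · rw [if_pos h3, specStack_head_neg1 K graph v _ rest' (by rw [hchild]; simp [h1, h2, h3])]
        · rw [if_neg h3]
          refine (specStack_congr K graph v pn adj' (c :: adj') (pc + 1) pc
            (pt + calcA K graph d' (PySem.Set.add v c) c) pt (Nat.succ d') (Nat.succ d')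
            rest' ?_)
          rw [hchild]; simp [h1, h2, h3]
      · rw [if_neg h2]
        refine (specStack_congr K graph v pn adj' (c :: adj') pc pc
          (pt + calcA K graph d' (PySem.Set.add v c) c) pt (Nat.succ d') (Nat.succ d')
          rest' ?_)
        rw [hchild]; simp [h1, h2]
  case case4 =>
    rename_i v pn pc pt n res
    rw [specStack_single, specFrame_final]
    rfl
  case case5 =>
    rename_i v pn1 pc1 pt1 n res pn padj pc pt pd rest' h
    have h' : specFrame K graph v (pn1, [], pc1, pt1, Nat.succ n) = -1 := by
      rw [specFrame_final]; exact h
    rw [specStack_head_neg1 K graph v _ _ h']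
  case case6 =>
    rename_i v pn1 pc1 pt1 n res pn padj pc pt pd rest' h1 h2 h3
    rw [specStack_cons_cons, specFrame_final]
    have e1 : ¬ ((if pt1 = K then 0 else if pc1 ≤ 1 then pt1 else (-1 : Int)) = -1) := h1
    have e2 : (if pt1 = K then 0 else if pc1 ≤ 1 then pt1 else (-1 : Int)) > 0 := h2
    rw [if_neg e1, if_pos e2, if_pos h3]
  case case7 =>
    rename_i v pn1 pc1 pt1 n res pn padj pc pt pd rest' h1 h2 h3 ih
    rw [ih, specStack_cons_cons, specFrame_final]
    have e1 : ¬ ((if pt1 = K then 0 else if pc1 ≤ 1 then pt1 else (-1 : Int)) = -1) := h1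
    have e2 : (if pt1 = K then 0 else if pc1 ≤ 1 then pt1 else (-1 : Int)) > 0 := h2
    rw [if_neg e1, if_pos e2, if_neg h3]
    rfl
  case case8 =>
    rename_i v pn1 pc1 pt1 n res pn padj pc pt pd rest' h1 h2 ih
    rw [ih, specStack_cons_cons, specFrame_final]
    have e1 : ¬ ((if pt1 = K then 0 else if pc1 ≤ 1 then pt1 else (-1 : Int)) = -1) := h1
    have e2 : ¬ ((if pt1 = K then 0 else if pc1 ≤ 1 then pt1 else (-1 : Int)) > 0) := h2
    rw [if_neg e1, if_neg e2]
    rfl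
  case case9 =>
    rename_i v pn padj pc pt res
    rw [specStack_single, specFrame_zero]
  case case10 =>
    rename_i v pn1 padj1 pc1 pt1 res pn padj pc pt pd rest' h
    exact absurd h (by norm_num)
  case case11 =>
    rename_i v pn1 padj1 pc1 pt1 res pn padj pc pt pd rest' h1 h2 h3
    exact absurd h2 (by norm_num)
  case case12 =>
    rename_i v pn1 padj1 pc1 pt1 res pn padj pc pt pd rest' h1 h2 h3 ih
    exact absurd h2 (by norm_num)
  case case13 =>
    rename_i v pn1 padj1 pc1 pt1 res pn padj pc pt pd rest' h1 h2 ih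
    rw [ih, specStack_cons_cons, specFrame_zero]
    norm_num

-- ===== VERDICT (by name: the statement is the Claim_ definition above) =====
theorem calc_py_spec : Claim_equal_calc_py := by
  intro N K graph memo now_node _ _
  unfold Spec_calc_py calc_py calc_py_alt
  rw [runB_eq_specStack, specStack_single, specFrame_calcA]
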